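-- pv_equiv track=rewrite | github.com/omer-tal/TCENR | data_preprocess_utils.py | clean_review
-- ===== SOURCE A (Python) =====
-- TO_SPACE = '.,\t\n'
--
-- def clean_review(review,to_filter):
--     """
--     Removes characters from the review string that are in the to_filter string
--     The output is a filtered, lower case representation of the review, splitted to words by space
--     """
--     new_review = ""
--     # Go over every character and check weather to filter it
--     for c in review:
--         if c in TO_SPACE:
--             c=' '
--         if c not in to_filter:
--             # Lower the unfiltered character
--             new_review += c.lower()
--     # SPlit to words and return
--     new_review = new_review.split(" ")
--     review_stripped = []
--     for word in new_review:
--         new_word = word.strip()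
--         if len(new_word)>0:
--             review_stripped.append(new_word)
--     return new_review
-- ===== SOURCE B (Python) =====
-- TO_SPACE = '.,\t\n'
--
-- def clean_review(review, to_filter):
--     """Single-pass word builder: keeps a result list and a current-word buffer
--     instead of building one big string and splitting it afterwards."""
--     space_is_delimiter = ' ' not in to_filter
--     words = []
--     buf = []
--     for c in review:
--         if c in TO_SPACE or c == ' ':
--             if space_is_delimiter:
--                 words.append(''.join(buf))
--                 buf = []
--             # else: space is filtered out, drop the character
--         elif c not in to_filter:
--             buf.append(c.lower())
--     words.append(''.join(buf))
--     return words
-- ===== Notes on version B (the rewrite author's own statement) =====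
-- stated objective: alternative
-- what changed: Replaces A's build-one-big-string-then-split(" ") (plus a dead strip loop) with a single pass that maintains the result word list and a current-word buffer directly, flushing the buffer at each delimiter.
import Mathlib
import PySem

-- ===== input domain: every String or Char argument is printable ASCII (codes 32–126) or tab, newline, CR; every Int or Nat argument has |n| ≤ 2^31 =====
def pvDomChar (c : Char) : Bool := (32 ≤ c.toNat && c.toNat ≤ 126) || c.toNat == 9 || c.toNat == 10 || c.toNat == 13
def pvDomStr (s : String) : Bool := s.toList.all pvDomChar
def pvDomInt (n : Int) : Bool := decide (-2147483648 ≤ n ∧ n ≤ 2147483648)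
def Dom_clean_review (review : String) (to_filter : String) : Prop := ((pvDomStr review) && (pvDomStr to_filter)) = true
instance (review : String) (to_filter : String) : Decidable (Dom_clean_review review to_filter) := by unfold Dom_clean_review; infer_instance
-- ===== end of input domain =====

-- B replaces A's build-one-string-then-split(" ") with a single pass keeping a word list
-- and a current-word buffer (objective: alternative decomposition, same cost).

-- ===== PORT A =====
-- TO_SPACE = '.,\t\n'
def pvTOSPACE : List Char := ['.', ',', '\t', '\n']

-- Literal port of A. 'c in <string>' for a single character c is ported as list membership
-- of that character (exact). new_review.split(" ") is PySem.Chars.splitOn with the non-empty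
-- separator [' '] (Python never raises here). The dead 'review_stripped' loop is kept
-- (as _review_stripped) and, as in the Python, ignored by the return.
def clean_review (review : String) (to_filter : String) : List String :=
  let tf := to_filter.toList
  let new_review : List Char :=
    review.toList.foldl (fun acc c =>
      let c := if c ∈ pvTOSPACE then ' ' else c
      if c ∉ tf then acc ++ [PySem.Chars.lowerChar c] else acc) []
  let split := PySem.Chars.splitOn new_review [' ']
  let _review_stripped : List (List Char) :=
    split.foldl (fun acc word =>
      let new_word := PySem.Chars.strip word
      if 0 < new_word.length then acc ++ [new_word] else acc) []
  split.map String.ofList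

-- ===== PORT B =====
-- Literal port of Source B: one fold over the characters with state (words, buf).
def clean_review_alt (review : String) (to_filter : String) : List String :=
  let tf := to_filter.toList
  let space_is_delimiter : Bool := !(decide (' ' ∈ tf))
  let st := review.toList.foldl (fun (st : List (List Char) × List Char) c =>
      if c ∈ pvTOSPACE ∨ c = ' ' then
        if space_is_delimiter then (st.1 ++ [st.2], []) else st
      else if c ∉ tf then (st.1, st.2 ++ [PySem.Chars.lowerChar c])
      else st) ([], [])
  (st.1 ++ [st.2]).map String.ofList

-- ===== PRECONDITION & SPEC =====
def Spec_clean_review (review : String) (to_filter : String) (out : List String) : Prop := out = clean_review_alt review to_filter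
instance (review : String) (to_filter : String) (out : List String) : Decidable (Spec_clean_review review to_filter out) := by unfold Spec_clean_review; infer_instance

-- ===== CLAIM (what is proved, stated in full; the proofs are below) =====
def Claim_equal_clean_review : Prop := ∀ (review : String) (to_filter : String), Dom_clean_review review to_filter → Spec_clean_review review to_filter (clean_review review to_filter)

-- ===== LEMMAS AND PROOFS =====

-- What A's filtering loop appends for one character.
def pvFilt (tf : List Char) (c : Char) : List Char :=
  let c' := if c ∈ pvTOSPACE then ' ' else c
  if c' ∉ tf then [PySem.Chars.lowerChar c'] else []

-- Split a character list on ' ': (first word, remaining words).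
def pvSplitSp : List Char → List Char × List (List Char)
  | [] => ([], [])
  | c :: rest =>
    let p := pvSplitSp rest
    if c = ' ' then ([], p.1 :: p.2) else (c :: p.1, p.2)

lemma pvFilt_step (tf : List Char) :
    (fun (acc : List Char) (c : Char) =>
      let c := if c ∈ pvTOSPACE then ' ' else c
      if c ∉ tf then acc ++ [PySem.Chars.lowerChar c] else acc)
    = (fun acc c => acc ++ pvFilt tf c) := by
  funext acc c
  simp only [pvFilt]
  split_ifs <;> simp

lemma pvSplitOn_go (l : List Char) : ∀ (fuel : Nat) (cur : List Char) (acc : List (List Char)),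
    l.length ≤ fuel →
    PySem.Chars.splitOn.go [' '] fuel l cur acc
      = acc.reverse ++ (cur.reverse ++ (pvSplitSp l).1) :: (pvSplitSp l).2 := by
  induction l with
  | nil =>
    intro fuel cur acc _
    cases fuel <;> simp [PySem.Chars.splitOn.go, pvSplitSp]
  | cons c rest ih =>
    intro fuel cur acc hfuel
    cases fuel with
    | zero => simp at hfuel
    | succ f =>
      simp only [PySem.Chars.splitOn.go]
      by_cases hc : c = ' '
      · subst hc
        simp only [List.isPrefixOf, BEq.rfl, Bool.true_and, if_pos]
        rw [show List.drop [' '].length (' ' :: rest) = rest from rfl]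
        rw [ih f [] (cur.reverse :: acc) (by simpa using Nat.le_of_succ_le_succ hfuel)]
        simp [pvSplitSp]
      · have hpre : ([' '].isPrefixOf (c :: rest)) = false := by
          simp [List.isPrefixOf]
          intro h; exact absurd h.symm hc
        rw [hpre]
        simp only [Bool.false_eq_true, if_false]
        rw [ih f (c :: cur) acc (by simpa using Nat.le_of_succ_le_succ hfuel)]
        simp [pvSplitSp, hc]

lemma pvSplitOn_eq (l : List Char) :
    PySem.Chars.splitOn l [' '] = (pvSplitSp l).1 :: (pvSplitSp l).2 := by
  unfold PySem.Chars.splitOn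
  rw [pvSplitOn_go l (l.length + 1) [] [] (Nat.le_succ _)]
  simp

lemma pvLowerChar_ne_space {c : Char} (hc : c ≠ ' ') : PySem.Chars.lowerChar c ≠ ' ' := by
  unfold PySem.Chars.lowerChar
  split_ifs with h
  · unfold PySem.Chars.isupper at h
    simp only [Bool.and_eq_true, decide_eq_true_eq] at h
    intro he
    have h32 : (Char.ofNat (c.toNat + 32)).toNat = 32 := by rw [he]; decide
    rw [Char.toNat_ofNat] at h32
    have hA' : 65 ≤ c.toNat := h.1
    have hZ' : c.toNat ≤ 90 := h.2
    have hv : (c.toNat + 32).isValidChar := Or.inl (by omega)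
    simp [hv] at h32
    omega
  · exact hc

-- Invariant of B's fold: flushing the final buffer yields the words flushed so far
-- followed by the space-split of the filtered remainder.
lemma pvB_inv (tf : List Char) (sd : Bool) (hsd : sd = !(decide (' ' ∈ tf)))
    (l : List Char) : ∀ (words : List (List Char)) (buf : List Char),
    ((l.foldl (fun (st : List (List Char) × List Char) c =>
        if c ∈ pvTOSPACE ∨ c = ' ' then
          if sd then (st.1 ++ [st.2], []) else st
        else if c ∉ tf then (st.1, st.2 ++ [PySem.Chars.lowerChar c])
        else st) (words, buf)).1
     ++ [(l.foldl (fun (st : List (List Char) × List Char) c =>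
        if c ∈ pvTOSPACE ∨ c = ' ' then
          if sd then (st.1 ++ [st.2], []) else st
        else if c ∉ tf then (st.1, st.2 ++ [PySem.Chars.lowerChar c])
        else st) (words, buf)).2])
    = words ++ (buf ++ (pvSplitSp (l.flatMap (pvFilt tf))).1)
        :: (pvSplitSp (l.flatMap (pvFilt tf))).2 := by
  induction l with
  | nil => intro words buf; simp [pvSplitSp]
  | cons c rest ih =>
    intro words buf
    simp only [List.foldl_cons, List.flatMap_cons]
    by_cases h1 : c ∈ pvTOSPACE ∨ c = ' '
    · have hc' : (if c ∈ pvTOSPACE then ' ' else c) = ' ' := by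
        rcases h1 with h | rfl
        · exact if_pos h
        · split <;> rfl
      have hlsp : PySem.Chars.lowerChar ' ' = ' ' := by decide
      have hfc : pvFilt tf c = if ' ' ∈ tf then [] else [' '] := by
        simp only [pvFilt, hc', hlsp]
        split_ifs <;> simp_all
      rw [if_pos h1]
      by_cases h2 : ' ' ∈ tf
      · have hsd' : sd = false := by simp [hsd, h2]
        subst hsd'
        simp only [Bool.false_eq_true, if_false] at ih ⊢
        rw [ih]
        simp [hfc, h2]
      · have hsd' : sd = true := by simp [hsd, h2]
        subst hsd'
        simp only [reduceIte] at ih ⊢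
        rw [ih]
        simp [hfc, h2, pvSplitSp]
    · obtain ⟨h1a, h1b⟩ := not_or.mp h1
      rw [if_neg (by tauto)]
      have hfc : pvFilt tf c = if c ∉ tf then [PySem.Chars.lowerChar c] else [] := by
        simp [pvFilt, h1a]
      by_cases h3 : c ∈ tf
      · rw [if_neg (by simp [h3])]
        rw [ih]
        simp [hfc, h3]
      · rw [if_pos h3]
        rw [ih]
        have hne : PySem.Chars.lowerChar c ≠ ' ' := pvLowerChar_ne_space h1b
        simp [hfc, h3, pvSplitSp, hne]

-- ===== VERDICT (by name: the statement is the Claim_ definition above) =====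
theorem clean_review_spec : Claim_equal_clean_review := by
  intro review to_filter _
  unfold Spec_clean_review clean_review clean_review_alt
  simp only [pvFilt_step, PySem.List.foldl_append_eq_flatMap, List.nil_append]
  rw [pvSplitOn_eq, pvB_inv (to_filter.toList) _ rfl]
  simp
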